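-- pv_equiv track=rewrite | github.com/cksystemsteaching/selfie | tools/qubot/tools.py | get_bit_repr_of_number
-- ===== SOURCE A (Python) =====
-- from typing import List, Optional, Dict
--
-- def get_bit_repr_of_number(number: int, size_in_bits: int = 64) -> List[int]:
--     if number > (2 ** size_in_bits - 1):
--         raise Exception(f"{number} cannot be represented with {size_in_bits} bits")
--     s = bin(number & int("1" * size_in_bits, 2))[2:]
--     str_repr = ("{0:0>%s}" % size_in_bits).format(s)
--
--     bits = []
--
--     # index 0 contains the least significant bit
--     for c in str_repr[::-1]:
--         bits.append(int(c))
--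
--     return bits
-- ===== SOURCE B (Python) =====
-- from typing import List
--
-- def get_bit_repr_of_number(number: int, size_in_bits: int = 64) -> List[int]:
--     if number > 2 ** size_in_bits - 1:
--         raise Exception(f"{number} cannot be represented with {size_in_bits} bits")
--     # index 0 contains the least significant bit
--     return [(number >> i) & 1 for i in range(size_in_bits)]
-- ===== Notes on version B (the rewrite author's own statement) =====
-- stated objective: idiomatic
-- what changed: A builds a mask by parsing the string '1'*size_in_bits, formats the masked number with bin(), left-pads it with a format string and reads the reversed characters back into ints; B extracts each bit directly with arithmetic shift and mask ([(number >> i) & 1 for i in range(size_in_bits)]), avoiding all string construction and parsing.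
import Mathlib
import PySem

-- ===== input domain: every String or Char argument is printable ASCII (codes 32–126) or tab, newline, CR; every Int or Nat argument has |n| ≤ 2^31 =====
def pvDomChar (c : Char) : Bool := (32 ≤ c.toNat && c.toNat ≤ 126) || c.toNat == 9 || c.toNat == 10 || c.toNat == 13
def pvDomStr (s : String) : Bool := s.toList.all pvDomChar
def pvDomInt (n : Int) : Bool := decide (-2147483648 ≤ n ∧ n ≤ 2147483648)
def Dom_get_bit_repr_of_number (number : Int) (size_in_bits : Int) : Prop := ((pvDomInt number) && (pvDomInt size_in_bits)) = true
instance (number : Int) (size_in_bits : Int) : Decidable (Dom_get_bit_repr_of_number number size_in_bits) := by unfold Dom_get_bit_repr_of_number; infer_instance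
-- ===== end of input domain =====

-- B replaces A's string round-trip (mask string → int, bin() → padded string → reversed chars)
-- by direct arithmetic bit extraction; equivalence is proved on the inputs where A returns.

-- ===== PORT A =====
-- int("1"*size_in_bits, 2): hand-ported as the base-2 left fold over the digit chars —
-- exact here because the parsed string consists of '1' digits only (no sign/space/underscore;
-- the empty string, size_in_bits ≤ 0, raises ValueError in Python and is excluded by Pre_).
def pvParseOnes (cs : List Char) : Int :=
  cs.foldl (fun acc c => acc * 2 + (if c = '1' then 1 else 0)) 0

-- bin(x)[2:] for x ≥ 0, hand-ported digit recursion (most significant digit first);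
-- exact for nonnegative x, and the masked number below is always nonnegative.
def pvBinCore : Nat → List Char
  | 0 => []
  | (m+1) => pvBinCore ((m+1) / 2) ++ [if (m+1) % 2 = 1 then '1' else '0']
decreasing_by omega

def pvBinChars (m : Nat) : List Char := if m = 0 then ['0'] else pvBinCore m

def get_bit_repr_of_number (number : Int) (size_in_bits : Int) : List Int :=
  -- 'raise Exception(...)': fires only outside Pre_ (value there is unclaimed)
  if number > 2 ^ size_in_bits.toNat - 1 then []
  else
    let mask := pvParseOnes (List.replicate size_in_bits.toNat '1')
    let s := pvBinChars (PySem.Int.band number mask).toNat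
    let str_repr := List.replicate (size_in_bits.toNat - s.length) '0' ++ s
    -- for c in str_repr[::-1]: bits.append(int(c))  — int(c) with c ∈ {'0','1'}
    str_repr.reverse.map (fun c => if c = '1' then (1 : Int) else 0)

-- ===== PORT B =====
def get_bit_repr_of_number_alt (number : Int) (size_in_bits : Int) : List Int :=
  -- 'raise Exception(...)': fires only outside Pre_ (value there is unclaimed)
  if number > 2 ^ size_in_bits.toNat - 1 then []
  else (PySem.List.pyRange 0 size_in_bits 1).map (fun i => PySem.Int.band (number >>> i.toNat) 1)

-- ===== PRECONDITION & SPEC =====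
-- Pre_ is exactly where Python A returns: size_in_bits ≥ 1 (otherwise int("1"*size_in_bits, 2)
-- raises ValueError) and number ≤ 2^size_in_bits - 1 (otherwise the explicit Exception).
def Pre_get_bit_repr_of_number (number : Int) (size_in_bits : Int) : Prop :=
  1 ≤ size_in_bits ∧ number ≤ 2 ^ size_in_bits.toNat - 1

instance (number : Int) (size_in_bits : Int) : Decidable (Pre_get_bit_repr_of_number number size_in_bits) := by
  unfold Pre_get_bit_repr_of_number; infer_instance

def pvWitness_get_bit_repr_of_number : Int × Int := (5, 4)

def Spec_get_bit_repr_of_number (number : Int) (size_in_bits : Int) (out : List Int) : Prop := out = get_bit_repr_of_number_alt number size_in_bits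
instance (number : Int) (size_in_bits : Int) (out : List Int) : Decidable (Spec_get_bit_repr_of_number number size_in_bits out) := by unfold Spec_get_bit_repr_of_number; infer_instance

-- ===== CLAIM (what is proved, stated in full; the proofs are below) =====
def Claim_equal_get_bit_repr_of_number : Prop := ∀ (number : Int) (size_in_bits : Int), Dom_get_bit_repr_of_number number size_in_bits → Pre_get_bit_repr_of_number number size_in_bits → Spec_get_bit_repr_of_number number size_in_bits (get_bit_repr_of_number number size_in_bits)

-- ===== LEMMAS AND PROOFS =====

-- int("1"*n, 2) = 2^n - 1
theorem pvParseOnes_aux (n : Nat) (acc : Int) :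
    List.foldl (fun acc c => acc * 2 + (if c = '1' then 1 else 0)) acc (List.replicate n '1')
      = acc * 2 ^ n + (2 ^ n - 1) := by
  induction n generalizing acc with
  | zero => simp
  | succ n ih =>
    rw [List.replicate_succ, List.foldl_cons, ih]
    norm_num
    ring

theorem pvParseOnes_replicate (n : Nat) :
    pvParseOnes (List.replicate n '1') = 2 ^ n - 1 := by
  unfold pvParseOnes
  rw [pvParseOnes_aux]
  ring

-- number & (2^n - 1) = number mod 2^n  (Python two's-complement &)
theorem pv_band_mask (a : Int) (n : Nat) :
    PySem.Int.band a ((2 : Int) ^ n - 1) = a % ((2 : Int) ^ n) := by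
  have hcastN : ((2 ^ n : Nat) : Int) = (2 : Int) ^ n := by push_cast; rfl
  have hN : (0 : Int) < 2 ^ n := by positivity
  have hmask : (0 : Int) ≤ 2 ^ n - 1 := by omega
  have h1 : ((2 : Int) ^ n - 1).toNat = 2 ^ n - 1 := by omega
  unfold PySem.Int.band
  by_cases ha : (0 : Int) ≤ a
  · rw [if_pos ha, if_pos hmask, h1, Nat.and_two_pow_sub_one_eq_mod]
    have h2 : a = (a.toNat : Int) := (Int.toNat_of_nonneg ha).symm
    conv_rhs => rw [h2, ← hcastN]
    rw [← Int.natCast_emod]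
  · rw [if_neg ha, if_pos hmask, h1, Nat.and_comm, Nat.and_two_pow_sub_one_eq_mod]
    set x : Nat := (-a - 1).toNat with hx
    have hxa : (x : Int) = -a - 1 := by
      rw [hx, Int.toNat_of_nonneg (by omega)]
    have hNpos : 0 < (2 : Nat) ^ n := Nat.pow_pos (by norm_num)
    obtain ⟨k, hk⟩ : ∃ k, x = 2 ^ n * k + x % 2 ^ n :=
      ⟨x / 2 ^ n, (Nat.div_add_mod x (2 ^ n)).symm⟩
    have hr : x % 2 ^ n < 2 ^ n := Nat.mod_lt _ hNpos
    have ha' : a = (2 : Int) ^ n * (-(k : Int) - 1) + ((2 ^ n - 1 - x % 2 ^ n : Nat) : Int) := by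
      have e1 : (x : Int) = ((2 ^ n : Nat) : Int) * (k : Int) + ((x % 2 ^ n : Nat) : Int) := by
        exact_mod_cast congrArg (Nat.cast : Nat → Int) hk
      have e2 : ((2 ^ n - 1 - x % 2 ^ n : Nat) : Int)
          = ((2 ^ n : Nat) : Int) - 1 - ((x % 2 ^ n : Nat) : Int) := by
        omega
      have e3 : (2 : Int) ^ n * (-(k : Int) - 1)
          = -(((2 ^ n : Nat) : Int) * (k : Int)) - ((2 ^ n : Nat) : Int) := by
        rw [hcastN]
        ring
      rw [e2, e3]
      linarith [hxa, e1]
    conv_rhs => rw [ha', add_comm]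
    rw [Int.add_mul_emod_self_left]
    rw [Int.emod_eq_of_lt (Int.natCast_nonneg _) (by omega)]

-- bits of 0 are all 0
theorem pv_bits_zero (k : Nat) :
    (List.range k).map (fun i => (((0 >>> i) % 2 : Nat) : Int)) = List.replicate k 0 := by
  simp [List.map_const']

theorem pvBinCore_eq (m : Nat) (hm : m ≠ 0) :
    pvBinCore m = pvBinCore (m / 2) ++ [if m % 2 = 1 then '1' else '0'] := by
  cases m with
  | zero => exact absurd rfl hm
  | succ m => rw [pvBinCore]

-- A's core: left-pad the binary string to n digits, reverse, read each char as an int —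
-- equals the LSB-first bit list of m, for m < 2^n.
theorem pv_core (n : Nat) (hn : 0 < n) : ∀ m : Nat, m < 2 ^ n →
    ((List.replicate (n - (pvBinChars m).length) '0' ++ pvBinChars m).reverse.map
        (fun c => if c = '1' then (1 : Int) else 0))
      = (List.range n).map (fun i => (((m >>> i) % 2 : Nat) : Int)) := by
  induction n with
  | zero => omega
  | succ n ih =>
    intro m hm
    by_cases hm0 : m = 0
    · subst hm0
      rw [pv_bits_zero]
      simp [pvBinChars, List.reverse_replicate, List.replicate_succ]
    · have hbc : pvBinChars m = pvBinCore (m / 2) ++ [if m % 2 = 1 then '1' else '0'] := by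
        rw [pvBinChars, if_neg hm0, pvBinCore_eq m hm0]
      have hd : (if (if m % 2 = 1 then '1' else '0') = '1' then (1 : Int) else 0)
          = ((m % 2 : Nat) : Int) := by
        rcases Nat.mod_two_eq_zero_or_one m with h | h <;> simp [h]
      have hrange : (List.range (n + 1)).map (fun i => (((m >>> i) % 2 : Nat) : Int))
          = ((m % 2 : Nat) : Int)
              :: (List.range n).map (fun i => ((((m / 2) >>> i) % 2 : Nat) : Int)) := by
        rw [List.range_succ_eq_map, List.map_cons, List.map_map]
        refine congrArg₂ _ (by simp) (List.map_congr_left ?_)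
        intro a _
        simp only [Function.comp]
        rw [Nat.shiftRight_succ_inside]
      have hlen : (pvBinChars m).length = (pvBinCore (m / 2)).length + 1 := by
        rw [hbc]
        simp
      have hsplit : List.replicate (n + 1 - (pvBinChars m).length) '0' ++ pvBinChars m
          = (List.replicate (n - (pvBinCore (m / 2)).length) '0' ++ pvBinCore (m / 2))
            ++ [if m % 2 = 1 then '1' else '0'] := by
        have hcount : n + 1 - (pvBinChars m).length = n - (pvBinCore (m / 2)).length := by
          omega
        rw [hcount, hbc, ← List.append_assoc]
      rw [hrange, hsplit, List.reverse_append, List.reverse_singleton,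
        List.singleton_append, List.map_cons, hd]
      congr 1
      have hdiv : m / 2 < 2 ^ n := by
        have h2 : (2 : Nat) ^ (n + 1) = 2 ^ n * 2 := by ring
        rw [Nat.div_lt_iff_lt_mul (by norm_num)]
        omega
      by_cases hq : m / 2 = 0
      · rw [hq, pv_bits_zero]
        have h0 : pvBinCore 0 = ([] : List Char) := by rw [pvBinCore]
        simp [h0, List.reverse_replicate]
      · have hn0 : 0 < n := by
          by_contra h
          have hn' : n = 0 := by omega
          subst hn'
          interval_cases m <;> simp_all
        have := ih hn0 (m / 2) hdiv
        rwa [pvBinChars, if_neg hq] at this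

-- bridge: bit i of (number mod 2^n) = (number >> i) & 1, for i < n
theorem pv_bridge (number : Int) (n i : Nat) (hi : i < n) :
    ((((number % 2 ^ n).toNat >>> i) % 2 : Nat) : Int)
      = PySem.Int.band (number >>> ((i : Nat) : Int)) 1 := by
  rw [Int.shiftRight_natCast_right]
  have hm0 : (0 : Int) ≤ number % 2 ^ n := Int.emod_nonneg _ (by positivity)
  set m : Int := number % 2 ^ n with hmdef
  have hmm : (m.toNat : Int) = m := Int.toNat_of_nonneg hm0
  have h1 : ((m.toNat >>> i : Nat) : Int) = m / 2 ^ i := by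
    rw [Nat.shiftRight_eq_div_pow, Int.natCast_ediv, hmm]
    push_cast
    rfl
  have h2 : (((m.toNat >>> i) % 2 : Nat) : Int) = (m / 2 ^ i) % 2 := by
    rw [Int.natCast_emod, h1]
    rfl
  rw [h2, PySem.Int.band_one, PySem.Int.mod_eq_emod_of_pos (by norm_num),
    Int.shiftRight_eq_div_pow]
  push_cast
  have hpow : (2 : Int) ^ (n - i) * 2 ^ i = 2 ^ n := by
    rw [← pow_add]
    congr 1
    omega
  obtain ⟨q, hq⟩ : ∃ q, number = m + 2 ^ (n - i) * q * 2 ^ i := by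
    refine ⟨number / 2 ^ n, ?_⟩
    have hdm := Int.mul_ediv_add_emod number (2 ^ n)
    have h3 : (2 : Int) ^ (n - i) * (number / 2 ^ n) * 2 ^ i
        = 2 ^ n * (number / 2 ^ n) := by
      rw [mul_right_comm, hpow]
    rw [← hmdef] at hdm
    linarith
  have hdiv : number / 2 ^ i = m / 2 ^ i + 2 ^ (n - i) * q := by
    rw [hq, Int.add_mul_ediv_right _ _ (by positivity : (0:Int) < 2 ^ i).ne']
  rw [hdiv]
  obtain ⟨j, hj⟩ : ∃ j, n - i = j + 1 := ⟨n - i - 1, by omega⟩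
  rw [hj, pow_succ']
  rw [show (2 : Int) * 2 ^ j * q = 2 ^ j * q * 2 by ring]
  rw [Int.add_mul_emod_self_right]

-- ===== VERDICT (by name: the statement is the Claim_ definition above) =====
theorem get_bit_repr_of_number_spec : Claim_equal_get_bit_repr_of_number := by
  intro number size_in_bits _ hpre
  obtain ⟨hs, hnum⟩ := hpre
  unfold Spec_get_bit_repr_of_number get_bit_repr_of_number get_bit_repr_of_number_alt
  set n : Nat := size_in_bits.toNat with hn
  have hn0 : 0 < n := by omega
  rw [if_neg (by omega), if_neg (by omega)]
  simp only [pvParseOnes_replicate, pv_band_mask, PySem.List.pyRange_one]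
  have hmlt : (number % (2 : Int) ^ n).toNat < 2 ^ n := by
    have h1 : number % (2 : Int) ^ n < 2 ^ n := Int.emod_lt_of_pos _ (by positivity)
    have h2 : (0 : Int) ≤ number % 2 ^ n := Int.emod_nonneg _ (by positivity)
    have h3 : ((2 ^ n : Nat) : Int) = (2 : Int) ^ n := by push_cast; rfl
    omega
  rw [pv_core n hn0 _ hmlt]
  have hsz : (size_in_bits - 0).toNat = n := by omega
  rw [hsz, List.map_map]
  apply List.map_congr_left
  intro i hi
  have hi' : i < n := List.mem_range.mp hi
  simp only [Function.comp]
  have htn : (((0 : Int) + (i : Int)).toNat : Int) = (i : Int) := by omega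
  rw [htn]
  exact pv_bridge number n i hi'
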